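-- pv_equiv track=rewrite | github.com/yangwei-nlp/Python-Starter | 剑指offer/10.斐波那契数列.py | niupi_jump
-- ===== SOURCE A (Python) =====
-- def niupi_jump(n):
--     """递归解法"""
--     if n == 1:
--         return 1
--     else:
--         num = 1
--         for i in range(1, n):
--             num += niupi_jump(i)
--         return num
-- ===== SOURCE B (Python) =====
-- def niupi_jump(n):
--     """Closed form: f(1)=1 and f(n)=1+sum(f(1..n-1)) gives f(n)=2**(n-1); the loop is empty below 1, giving 1."""
--     return 1 if n <= 1 else 2 ** (n - 1)
-- ===== Notes on version B (the rewrite author's own statement) =====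
-- stated objective: simpler
-- what changed: Replaced the recursion that re-sums all predecessor values with the closed form 2**(n-1), returning 1 when n <= 1.
import Mathlib
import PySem

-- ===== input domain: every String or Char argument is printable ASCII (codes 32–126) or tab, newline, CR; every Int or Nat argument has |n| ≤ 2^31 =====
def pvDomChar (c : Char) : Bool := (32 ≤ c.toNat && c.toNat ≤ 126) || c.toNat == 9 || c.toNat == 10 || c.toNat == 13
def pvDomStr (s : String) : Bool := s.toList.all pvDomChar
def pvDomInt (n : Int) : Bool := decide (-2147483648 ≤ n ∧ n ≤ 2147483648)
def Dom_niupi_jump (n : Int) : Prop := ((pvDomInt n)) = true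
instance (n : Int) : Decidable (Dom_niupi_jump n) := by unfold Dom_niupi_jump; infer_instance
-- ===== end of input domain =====

-- B replaces A's exponential recursion by the closed form 2^(n-1) (1 for n ≤ 1); objective: simpler closed form.

-- ===== PORT A =====
-- literal transliteration: if n == 1 return 1; else num = 1; for i in range(1, n): num += niupi_jump(i); return num
def niupi_jump (n : Int) : Int :=
  if n = 1 then 1
  else (PySem.List.pyRange 1 n 1).attach.foldl (fun num i => num + niupi_jump i.1) 1
termination_by n.toNat
decreasing_by
  have h := (PySem.List.mem_pyRange_one.mp i.2)
  omega

-- ===== PORT B =====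
-- 2 ^ (n-1).toNat is exact for Python's 2 ** (n - 1) since this branch has n ≥ 2
def niupi_jump_alt (n : Int) : Int :=
  if n ≤ 1 then 1 else 2 ^ (n - 1).toNat

-- ===== PRECONDITION & SPEC =====
def Spec_niupi_jump (n : Int) (out : Int) : Prop := out = niupi_jump_alt n
instance (n : Int) (out : Int) : Decidable (Spec_niupi_jump n out) := by unfold Spec_niupi_jump; infer_instance

-- ===== CLAIM (what is proved, stated in full; the proofs are below) =====
def Claim_equal_niupi_jump : Prop := ∀ (n : Int), Dom_niupi_jump n → Spec_niupi_jump n (niupi_jump n)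

-- ===== LEMMAS AND PROOFS =====

-- A's loop body as a sum
theorem niupi_jump_eq_sum (n : Int) (hn : n ≠ 1) :
    niupi_jump n = 1 + ((PySem.List.pyRange 1 n 1).map niupi_jump).sum := by
  have aux : ∀ (l : List Int) (a : Int),
      l.attach.foldl (fun num i => num + niupi_jump i.1) a = a + (l.map niupi_jump).sum := by
    intro l
    induction l with
    | nil => intro a; simp
    | cons x xs ih =>
      intro a
      simp only [List.attach_cons, List.foldl_cons, List.map_cons, List.sum_cons, List.foldl_map, ih]
      ring
  rw [niupi_jump]
  simp only [if_neg hn]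
  rw [aux]

-- the doubling law of the closed form
theorem alt_double (m : Int) (hm : 1 ≤ m) :
    niupi_jump_alt m + niupi_jump_alt m = niupi_jump_alt (m + 1) := by
  unfold niupi_jump_alt
  rcases eq_or_lt_of_le hm with h | h
  · simp [← h]
  · have h1 : ¬ m ≤ 1 := by omega
    have h2 : ¬ m + 1 ≤ 1 := by omega
    simp only [if_neg h1, if_neg h2]
    have : (m + 1 - 1).toNat = (m - 1).toNat + 1 := by omega
    rw [this, pow_succ]
    ring

-- Σ_{i=1}^{m-1} alt(i) + 1 = alt(m) for m ≥ 1
theorem alt_sum (m : Int) (hm : 1 ≤ m) :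
    1 + ((PySem.List.pyRange 1 m 1).map niupi_jump_alt).sum = niupi_jump_alt m := by
  induction m, hm using Int.le_induction with
  | base => simp [PySem.List.pyRange_one_eq_nil, niupi_jump_alt]
  | succ m hm ih =>
    have hm : (1:Int) ≤ m := hm
    rw [PySem.List.pyRange_one_succ_right hm, List.map_append, List.sum_append]
    simp only [List.map_cons, List.map_nil, List.sum_cons, List.sum_nil]
    rw [← add_assoc, ih, add_zero, alt_double m hm]

theorem niupi_jump_eq_alt (n : Int) : niupi_jump n = niupi_jump_alt n := by
  by_cases h1 : n ≤ 1
  · by_cases he : n = 1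
    · rw [niupi_jump, if_pos he, niupi_jump_alt, if_pos h1]
    · rw [niupi_jump_eq_sum n he, PySem.List.pyRange_one_eq_nil (by omega), niupi_jump_alt,
        if_pos h1]
      simp
  · rw [niupi_jump_eq_sum n (by omega)]
    have hmap : (PySem.List.pyRange 1 n 1).map niupi_jump
        = (PySem.List.pyRange 1 n 1).map niupi_jump_alt := by
      apply List.map_congr_left
      intro i hi
      have h := PySem.List.mem_pyRange_one.mp hi
      have : i.toNat < n.toNat := by omega
      exact niupi_jump_eq_alt i
    rw [hmap, alt_sum n (by omega)]
termination_by n.toNat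

-- ===== VERDICT (by name: the statement is the Claim_ definition above) =====
theorem niupi_jump_spec : Claim_equal_niupi_jump := by
  intro n _
  exact niupi_jump_eq_alt n
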